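-- pv_equiv track=rewrite | github.com/MananDhiman/Practice | python/infytq/part-2/practice-problems/level-3/problem-20.py | ducci_sequence
-- ===== SOURCE A (Python) =====
-- def ducci_sequence(test_list,n):
--     list = []
--
--     for i in test_list:
--         list.append(i)
--
--     for i in range(n+1):
--         list[0] = abs(test_list[1] - test_list[0])
--         list[1] = abs(test_list[2] - test_list[1])
--         list[2] = abs(test_list[3] - test_list[2])
--         list[3] = abs(test_list[3] - test_list[0])
--
--         test_list.clear();
--         for i in list:
--             test_list.append(i)
--
--
--     return list
-- ===== SOURCE B (Python) =====
-- def ducci_sequence(test_list, n):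
--     steps = n + 1
--     if steps <= 0:
--         return list(test_list)
--     tail = test_list[4:]
--     seen = {}
--     seq = []
--     s = tuple(test_list[:4])
--     k = 0
--     while s not in seen and k < steps:
--         seen[s] = k
--         seq.append(s)
--         a, b, c, d = s
--         s = (abs(b - a), abs(c - b), abs(d - c), abs(d - a))
--         k += 1
--     if k < steps:
--         start = seen[s]
--         period = k - start
--         s = seq[start + (steps - start) % period]
--     result = list(s) + tail
--     test_list[:] = result
--     return result
-- ===== Notes on version B (the rewrite author's own statement) =====
-- stated objective: faster
-- what changed: B replaces A's n+1 explicit Ducci iterations with cycle detection (a dict of previously seen 4-tuples) followed by a modular-arithmetic jump into the recorded cycle, so the work is bounded by the orbit length instead of n.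
import Mathlib
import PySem

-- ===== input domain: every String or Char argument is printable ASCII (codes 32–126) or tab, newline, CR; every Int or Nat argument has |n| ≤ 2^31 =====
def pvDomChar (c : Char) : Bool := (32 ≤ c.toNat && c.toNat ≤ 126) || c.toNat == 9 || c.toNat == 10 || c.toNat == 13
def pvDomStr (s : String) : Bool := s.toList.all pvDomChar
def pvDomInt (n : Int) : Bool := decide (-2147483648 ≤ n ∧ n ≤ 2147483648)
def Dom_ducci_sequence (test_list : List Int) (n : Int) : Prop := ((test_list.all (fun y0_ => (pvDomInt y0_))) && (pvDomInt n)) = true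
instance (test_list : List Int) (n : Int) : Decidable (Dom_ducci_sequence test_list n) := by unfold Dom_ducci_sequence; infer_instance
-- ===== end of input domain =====

-- B replaces A's n+1 explicit Ducci iterations by cycle detection (hash of seen states)
-- plus a modular-arithmetic jump into the recorded cycle: measurably faster for large n.
-- A also mutates its test_list argument in place; the equivalence proved here is about the
-- RETURN value only (Python B performs the same mutation via test_list[:] = result).

-- ===== PORT A =====
def ducci_sequence (test_list : List Int) (n : Int) : List Int :=
  -- list = []; for i in test_list: list.append(i)
  let lst := test_list.foldl (fun acc i => acc ++ [i]) []
  -- for i in range(n+1): … (state = (test_list, list))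
  let st := (PySem.List.pyRange 0 (n + 1) 1).foldl
    (fun (st : List Int × List Int) _ =>
      let tl := st.1
      let lst := st.2
      let lst := PySem.List.pySetD lst 0 |PySem.List.pyGetD tl 1 0 - PySem.List.pyGetD tl 0 0|
      let lst := PySem.List.pySetD lst 1 |PySem.List.pyGetD tl 2 0 - PySem.List.pyGetD tl 1 0|
      let lst := PySem.List.pySetD lst 2 |PySem.List.pyGetD tl 3 0 - PySem.List.pyGetD tl 2 0|
      let lst := PySem.List.pySetD lst 3 |PySem.List.pyGetD tl 3 0 - PySem.List.pyGetD tl 0 0|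
      -- test_list.clear(); for i in list: test_list.append(i)
      let tl := lst.foldl (fun acc i => acc ++ [i]) []
      (tl, lst))
    (test_list, lst)
  st.2

-- ===== PORT B =====
-- a, b, c, d = s; one Ducci step on the 4-tuple
def pvStep (s : List Int) : List Int :=
  match s with
  | [a, b, c, d] => [|b - a|, |c - b|, |d - c|, |d - a|]
  | _ => []

-- while s not in seen and k < steps: … (fuel = steps.toNat bounds the iteration count)
def pvLoop (steps : Int) : Nat → PySem.Dict (List Int) Int → List (List Int) → List Int → Int →
    PySem.Dict (List Int) Int × List (List Int) × List Int × Int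
  | 0, seen, seq, s, k => (seen, seq, s, k)
  | fuel + 1, seen, seq, s, k =>
      if seen.contains s = false ∧ k < steps then
        pvLoop steps fuel (seen.insert s k) (seq ++ [s]) (pvStep s) (k + 1)
      else (seen, seq, s, k)

def ducci_sequence_alt (test_list : List Int) (n : Int) : List Int :=
  let steps := n + 1
  if steps ≤ 0 then test_list
  else
    let tail := PySem.List.slice test_list (some 4) none
    let r := pvLoop steps steps.toNat PySem.Dict.empty [] (PySem.List.slice test_list none (some 4)) 0
    let seen := r.1
    let seq := r.2.1
    let s := r.2.2.1
    let k := r.2.2.2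
    let s := if k < steps then
        let start := seen.getD s 0
        let period := k - start
        PySem.List.pyGetD seq (start + PySem.Int.mod (steps - start) period) []
      else s
    s ++ tail

-- ===== PRECONDITION & SPEC =====
-- Pre_ excludes exactly the inputs where A raises IndexError: fewer than 4 elements with n ≥ 0.
def Pre_ducci_sequence (test_list : List Int) (n : Int) : Prop := n < 0 ∨ 4 ≤ test_list.length
instance (test_list : List Int) (n : Int) : Decidable (Pre_ducci_sequence test_list n) := by
  unfold Pre_ducci_sequence; infer_instance

def pvWitness_ducci_sequence : List Int × Int := ([1, 2, 3, 4], 5)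

def Spec_ducci_sequence (test_list : List Int) (n : Int) (out : List Int) : Prop := out = ducci_sequence_alt test_list n
instance (test_list : List Int) (n : Int) (out : List Int) : Decidable (Spec_ducci_sequence test_list n out) := by unfold Spec_ducci_sequence; infer_instance

-- ===== CLAIM (what is proved, stated in full; the proofs are below) =====
def Claim_equal_ducci_sequence : Prop := ∀ (test_list : List Int) (n : Int), Dom_ducci_sequence test_list n → Pre_ducci_sequence test_list n → Spec_ducci_sequence test_list n (ducci_sequence test_list n)

-- ===== LEMMAS AND PROOFS =====

-- the full step A performs on the whole list (first 4 entries mapped, the rest untouched)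
def pvFull (t : List Int) : List Int := pvStep (t.take 4) ++ t.drop 4

theorem pv_ex4 {t : List Int} (h : 4 ≤ t.length) :
    ∃ a b c d rest, t = a :: b :: c :: d :: rest := by
  match t with
  | a :: b :: c :: d :: rest => exact ⟨a, b, c, d, rest, rfl⟩
  | [] | [_] | [_, _] | [_, _, _] => simp at h

theorem pvFull_len {t : List Int} (h : 4 ≤ t.length) : (pvFull t).length = t.length := by
  obtain ⟨a, b, c, d, rest, rfl⟩ := pv_ex4 h
  simp [pvFull, pvStep]

theorem pvG (x0 x1 x2 x3 : Int) (r : List Int) :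
    PySem.List.pyGetD (x0 :: x1 :: x2 :: x3 :: r) 0 0 = x0 ∧
    PySem.List.pyGetD (x0 :: x1 :: x2 :: x3 :: r) 1 0 = x1 ∧
    PySem.List.pyGetD (x0 :: x1 :: x2 :: x3 :: r) 2 0 = x2 ∧
    PySem.List.pyGetD (x0 :: x1 :: x2 :: x3 :: r) 3 0 = x3 := by
  refine ⟨?_, ?_, ?_, ?_⟩ <;>
    rw [PySem.List.pyGetD_eq_getElem _ _ (by norm_num) (by simp; omega)] <;> simp

theorem pvS (l : List Int) (v : Int) :
    PySem.List.pySetD l 0 v = l.set 0 v ∧ PySem.List.pySetD l 1 v = l.set 1 v ∧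
    PySem.List.pySetD l 2 v = l.set 2 v ∧ PySem.List.pySetD l 3 v = l.set 3 v := by
  refine ⟨?_, ?_, ?_, ?_⟩ <;> rw [PySem.List.pySetD_of_nonneg _ _ (by norm_num)] <;> rfl

-- one iteration of A's loop body, on equal copies with at least 4 elements
theorem pvA_body (a b c d : Int) (rest : List Int) :
    (let tl := ((a :: b :: c :: d :: rest, a :: b :: c :: d :: rest) : List Int × List Int).1
     let lst := ((a :: b :: c :: d :: rest, a :: b :: c :: d :: rest) : List Int × List Int).2
     let lst := PySem.List.pySetD lst 0 |PySem.List.pyGetD tl 1 0 - PySem.List.pyGetD tl 0 0|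
     let lst := PySem.List.pySetD lst 1 |PySem.List.pyGetD tl 2 0 - PySem.List.pyGetD tl 1 0|
     let lst := PySem.List.pySetD lst 2 |PySem.List.pyGetD tl 3 0 - PySem.List.pyGetD tl 2 0|
     let lst := PySem.List.pySetD lst 3 |PySem.List.pyGetD tl 3 0 - PySem.List.pyGetD tl 0 0|
     let tl := lst.foldl (fun acc i => acc ++ [i]) []
     ((tl, lst) : List Int × List Int))
    = (pvFull (a :: b :: c :: d :: rest), pvFull (a :: b :: c :: d :: rest)) := by
  dsimp only
  simp only [(pvG a b c d rest).1, (pvG a b c d rest).2.1, (pvG a b c d rest).2.2.1,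
    (pvG a b c d rest).2.2.2]
  simp only [fun l v => (pvS l v).1, fun l v => (pvS l v).2.1,
    fun l v => (pvS l v).2.2.1, fun l v => (pvS l v).2.2.2]
  rw [PySem.List.foldl_append_singleton_eq_self]
  simp [pvFull, pvStep]

theorem pvA_fold (l : List Int) : ∀ (t : List Int), 4 ≤ t.length →
    l.foldl (fun (st : List Int × List Int) (_ : Int) =>
      let tl := st.1
      let lst := st.2
      let lst := PySem.List.pySetD lst 0 |PySem.List.pyGetD tl 1 0 - PySem.List.pyGetD tl 0 0|
      let lst := PySem.List.pySetD lst 1 |PySem.List.pyGetD tl 2 0 - PySem.List.pyGetD tl 1 0|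
      let lst := PySem.List.pySetD lst 2 |PySem.List.pyGetD tl 3 0 - PySem.List.pyGetD tl 2 0|
      let lst := PySem.List.pySetD lst 3 |PySem.List.pyGetD tl 3 0 - PySem.List.pyGetD tl 0 0|
      let tl := lst.foldl (fun acc i => acc ++ [i]) []
      (tl, lst)) (t, t)
    = (pvFull^[l.length] t, pvFull^[l.length] t) := by
  induction l with
  | nil => intro t _; simp
  | cons x l ih =>
    intro t h4
    obtain ⟨a, b, c, d, rest, rfl⟩ := pv_ex4 h4
    rw [List.foldl_cons, show _ = (pvFull (a :: b :: c :: d :: rest), pvFull (a :: b :: c :: d :: rest)) from pvA_body a b c d rest,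
      ih _ (by rw [pvFull_len h4]; exact h4)]
    simp [Function.iterate_succ_apply]

theorem ducci_A_eval (t : List Int) (n : Int) (h4 : 4 ≤ t.length) :
    ducci_sequence t n = pvFull^[(n + 1).toNat] t := by
  unfold ducci_sequence
  rw [show t.foldl (fun acc i => acc ++ [i]) [] = t by
    rw [PySem.List.foldl_append_singleton_eq_self]; simp]
  dsimp only
  rw [pvA_fold _ t h4]
  simp [PySem.List.length_pyRange_one]

theorem ducci_B_decomp (m : Nat) : ∀ (t : List Int), 4 ≤ t.length →
    pvFull^[m] t = pvStep^[m] (t.take 4) ++ t.drop 4 := by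
  induction m with
  | zero => intro t _; simp
  | succ m ih =>
    intro t h4
    obtain ⟨a, b, c, d, rest, rfl⟩ := pv_ex4 h4
    rw [Function.iterate_succ_apply, ih _ (by rw [pvFull_len h4]; exact h4)]
    have h1 : (pvFull (a :: b :: c :: d :: rest)).take 4 =
        pvStep ((a :: b :: c :: d :: rest).take 4) := by simp [pvFull, pvStep]
    have h2 : (pvFull (a :: b :: c :: d :: rest)).drop 4 =
        (a :: b :: c :: d :: rest).drop 4 := by simp [pvFull, pvStep]
    rw [h1, h2, ← Function.iterate_succ_apply]

theorem pv_iter_mod {α : Type} (g : α → α) (h : α) (S P : Nat) (hP : 0 < P)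
    (hcyc : g^[S + P] h = g^[S] h) : ∀ M, g^[S + M] h = g^[S + M % P] h := by
  intro M
  induction M using Nat.strong_induction_on with
  | _ M ih =>
    by_cases hM : M < P
    · rw [Nat.mod_eq_of_lt hM]
    · rw [not_lt] at hM
      have h2 : S + M = (M - P) + (S + P) := by omega
      have h3 : g^[S + M] h = g^[S + (M - P)] h := by
        rw [h2, Function.iterate_add_apply, hcyc, ← Function.iterate_add_apply]
        congr 1; omega
      rw [h3, ih (M - P) (by omega), Nat.mod_eq_sub_mod hM]

theorem pvLoop_correct (steps : Int) (h : List Int) :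
    ∀ (fuel : Nat) (seen : PySem.Dict (List Int) Int) (seq : List (List Int)) (s : List Int) (k : Int),
    0 ≤ k → k ≤ steps → steps.toNat ≤ fuel + k.toNat →
    s = pvStep^[k.toNat] h →
    (∀ j : Nat, j < k.toNat → seq[j]? = some (pvStep^[j] h)) →
    seq.length = k.toNat →
    (∀ x v, seen.get? x = some v → 0 ≤ v ∧ v < k ∧ pvStep^[v.toNat] h = x) →
    ((fun r => if r.2.2.2 < steps then
        PySem.List.pyGetD r.2.1 (r.1.getD r.2.2.1 0 + PySem.Int.mod (steps - r.1.getD r.2.2.1 0) (r.2.2.2 - r.1.getD r.2.2.1 0)) []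
      else r.2.2.1) (pvLoop steps fuel seen seq s k)
     = pvStep^[steps.toNat] h) := by
  intro fuel
  induction fuel with
  | zero =>
    intro seen seq s k hk0 hks hfuel hs _ _ _
    have hkeq : k = steps := by omega
    dsimp only [pvLoop]
    rw [if_neg (by omega : ¬ (k < steps)), hs]
    have : k.toNat = steps.toNat := by omega
    rw [this]
  | succ fuel ih =>
    intro seen seq s k hk0 hks hfuel hs hseq hlen hseen
    by_cases hc : seen.contains s = false ∧ k < steps
    · rw [show pvLoop steps (fuel + 1) seen seq s k
          = pvLoop steps fuel (seen.insert s k) (seq ++ [s]) (pvStep s) (k + 1) by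
        simp only [pvLoop, if_pos hc]]
      have hkn : (k + 1).toNat = k.toNat + 1 := by omega
      apply ih (seen.insert s k) (seq ++ [s]) (pvStep s) (k + 1)
      · omega
      · omega
      · omega
      · rw [hkn, Function.iterate_succ_apply', hs]
      · intro j hj
        rw [hkn] at hj
        rcases Nat.lt_or_ge j k.toNat with hlt | hge
        · rw [List.getElem?_append_left (by omega)]
          exact hseq j hlt
        · have hjeq : j = k.toNat := by omega
          subst hjeq
          rw [← hlen, List.getElem?_concat_length, hs, hlen]
      · simp [hlen, hkn]
      · intro x v hg
        rw [PySem.Dict.get?_insert] at hg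
        by_cases hx : x = s
        · rw [if_pos hx] at hg
          obtain rfl : k = v := by exact Option.some.inj hg
          exact ⟨hk0, by omega, (hx.trans hs).symm⟩
        · rw [if_neg hx] at hg
          obtain ⟨h1, h2, h3⟩ := hseen x v hg
          exact ⟨h1, by omega, h3⟩
    · rw [show pvLoop steps (fuel + 1) seen seq s k = (seen, seq, s, k) by
        simp only [pvLoop, if_neg hc]]
      by_cases hks' : k < steps
      · have hcontains : seen.contains s = true := by
          rcases Bool.eq_false_or_eq_true (seen.contains s) with h' | h'
          · exact h'
          · exact absurd ⟨h', hks'⟩ hc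
        rw [PySem.Dict.contains_eq_isSome_get?] at hcontains
        obtain ⟨start, hstart⟩ := Option.isSome_iff_exists.mp hcontains
        obtain ⟨hst0, hstk, hstv⟩ := hseen s start hstart
        have hgd : seen.getD s 0 = start := PySem.Dict.getD_of_get?_eq_some _ 0 hstart
        simp only [if_pos hks', hgd]
        have hPpos : (0:Int) < k - start := by omega
        rw [PySem.Int.mod_eq_emod_of_pos hPpos]
        have hm0 : 0 ≤ (steps - start) % (k - start) := Int.emod_nonneg _ (by omega)
        have hmlt : (steps - start) % (k - start) < k - start := Int.emod_lt_of_pos _ hPpos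
        set i : Int := start + (steps - start) % (k - start) with hidef
        have hi0 : 0 ≤ i := by omega
        have hik : i < k := by omega
        rw [PySem.List.pyGetD_eq_getElem _ _ hi0 (by rw [hlen]; omega)]
        have hval : seq[i.toNat] = pvStep^[i.toNat] h := by
          have hx := hseq i.toNat (by omega)
          rwa [List.getElem?_eq_getElem (by omega), Option.some.injEq] at hx
        rw [hval]
        have hmod := pv_iter_mod pvStep h start.toNat (k.toNat - start.toNat) (by omega)
          (by rw [show start.toNat + (k.toNat - start.toNat) = k.toNat by omega, ← hs, hstv])
          (steps.toNat - start.toNat)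
        rw [show start.toNat + (steps.toNat - start.toNat) = steps.toNat by omega] at hmod
        rw [hmod]
        have e3 : (steps - start) % (k - start)
            = (((steps.toNat - start.toNat) % (k.toNat - start.toNat) : Nat) : Int) := by
          rw [show steps - start = ((steps.toNat - start.toNat : Nat) : Int) by omega,
            show k - start = ((k.toNat - start.toNat : Nat) : Int) by omega, Int.natCast_mod]
        congr 1
        omega
      · simp only [if_neg hks']
        have hkeq : k = steps := by omega
        rw [hs, hkeq]

-- ===== VERDICT (by name: the statement is the Claim_ definition above) =====
theorem ducci_sequence_spec : Claim_equal_ducci_sequence := by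
  intro tl n _hdom hpre
  unfold Spec_ducci_sequence
  by_cases hle : n + 1 ≤ 0
  · unfold ducci_sequence ducci_sequence_alt
    rw [PySem.List.pyRange_one_eq_nil hle, PySem.List.foldl_append_singleton_eq_self]
    simp [hle]
  · have hpos : 0 < n + 1 := by omega
    have h4 : 4 ≤ tl.length := by
      rcases hpre with h | h
      · omega
      · exact h
    rw [ducci_A_eval tl n h4, ducci_B_decomp _ tl h4]
    unfold ducci_sequence_alt
    rw [if_neg hle]
    have htake : PySem.List.slice tl none (some 4) = tl.take 4 := by
      rw [PySem.List.slice_to _ (by norm_num)]; rfl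
    have hdrop : PySem.List.slice tl (some 4) none = tl.drop 4 := by
      rw [PySem.List.slice_from _ (by norm_num)]; rfl
    rw [htake, hdrop]
    have hloop := pvLoop_correct (n + 1) (tl.take 4) (n + 1).toNat PySem.Dict.empty []
      (tl.take 4) 0 (by omega) (by omega) (by omega) rfl
      (by intro j hj; omega)
      rfl
      (by intro x v hg; rw [PySem.Dict.get?_empty] at hg; exact absurd hg (by simp))
    simp only [] at hloop ⊢
    rw [hloop]
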